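-- pv_equiv track=rewrite | github.com/venkatachiranjeevi/algorithms | leetCode/aprilweekchallenge/zoombie.py | minHour
-- ===== SOURCE A (Python) =====
-- from collections import deque
--
-- def minHour(rows, columns, grid):
--     times = 0
--     Q = deque([])
--     directions = [[1, 0], [-1, 0], [0, 1], [0, -1]]
--
--     for i in range(rows):
--         for j in range(columns):
--             if grid[i][j] == 1:
--                 Q.append((i, j))
--
--     while (Q):
--         for _ in range(len(Q)):
--             x, y = Q.popleft()
--             for dir in directions:
--                 i = x + dir[0]
--                 j = y + dir[1]
--                 if 0 <= i < rows and 0 <= j < columns and grid[i][j] == 0: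
--                     grid[i][j] = 1
--                     Q.append((i, j))
--         times += 1
--     return max(0, times - 1)
-- ===== SOURCE B (Python) =====
-- def minHour(rows, columns, grid):
--     infected = {(i, j) for i in range(rows) for j in range(columns) if grid[i][j] == 1}
--     hours = 0
--     while True:
--         grown = infected | {(i + di, j + dj)
--                             for (i, j) in infected
--                             for (di, dj) in ((1, 0), (-1, 0), (0, 1), (0, -1))
--                             if 0 <= i + di < rows and 0 <= j + dj < columns
--                             and grid[i + di][j + dj] == 0}
--         if grown == infected:
--             return hours
--         infected = grown
--         hours += 1
-- ===== Notes on version B (the rewrite author's own statement) =====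
-- stated objective: alternative
-- what changed: Replaced A's queue-based multi-source BFS with in-place grid mutation by a fixed-point iteration of a set-dilation operator: keep the infected cells in a set, each round recompute the whole one-step dilation of that set against the unmodified grid, count rounds until the set stops growing; no queue, no frontier list, no grid mutation.
import Mathlib
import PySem

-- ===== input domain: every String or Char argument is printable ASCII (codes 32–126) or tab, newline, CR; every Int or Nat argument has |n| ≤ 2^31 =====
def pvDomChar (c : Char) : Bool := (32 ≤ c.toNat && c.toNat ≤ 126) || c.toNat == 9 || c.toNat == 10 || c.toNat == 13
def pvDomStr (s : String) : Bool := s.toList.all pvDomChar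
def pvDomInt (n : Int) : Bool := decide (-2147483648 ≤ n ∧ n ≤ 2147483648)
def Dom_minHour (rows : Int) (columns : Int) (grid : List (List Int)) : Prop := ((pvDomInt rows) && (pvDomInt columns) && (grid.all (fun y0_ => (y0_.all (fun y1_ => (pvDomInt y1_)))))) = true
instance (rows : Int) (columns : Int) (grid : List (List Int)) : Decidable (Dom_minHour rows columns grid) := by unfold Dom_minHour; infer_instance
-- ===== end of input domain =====

-- B replaces A's queue-based BFS flood (in-place grid marking, per-level batch loop, times counter,
-- max(0, times-1)) by a fixed-point iteration of a set-dilation operator over an immutable grid: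
-- each round the whole infected set is re-dilated by one step and rounds are counted until nothing grows.
-- A mutates `grid` in place; B does not: the equivalence proved here is about the return value only.
-- Both loops are ported with a fuel argument that only makes the recursion total (a strict upper bound
-- on the iteration count, proved unreached in the lemmas below).


-- ===== PORT A =====
-- grid[i][j] lookup (both Pythons guard 0 ≤ i < rows, 0 ≤ j < columns before every use except the
-- seeding pass, which Pre_ covers) and A's in-place `grid[i][j] = 1` assignment
def pvCell (g : List (List Int)) (i j : Int) : Option Int :=
  (PySem.List.pyGet? g i).bind (fun r => PySem.List.pyGet? r j)

def pvSet : List (List Int) → Nat → Nat → Int → List (List Int)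
  | [], _, _, _ => []
  | r :: g, 0, j, v => r.set j v :: g
  | r :: g, i + 1, j, v => r :: pvSet g i j v

-- number of 0-cells: every level of A's while-loop flips at least one of them (or empties the queue),
-- which bounds the iteration count and justifies A's fuel below
def pvZeros (g : List (List Int)) : Nat := (g.map (fun r => r.count 0)).sum

def pvDirs : List (Int × Int) := [(1, 0), (-1, 0), (0, 1), (0, -1)]

-- A's inner `for dir in directions` body for one popped cell: the mutated grid and the
-- cells appended (in order)
def pvStepA (rows cols x y : Int) : List (Int × Int) → List (List Int) → List (List Int) × List (Int × Int)
  | [], g => (g, [])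
  | (dx, dy) :: ds, g =>
    let i := x + dx
    let j := y + dy
    if 0 ≤ i ∧ i < rows ∧ 0 ≤ j ∧ j < cols ∧ pvCell g i j = some 0 then
      let rest := pvStepA rows cols x y ds (pvSet g i.toNat j.toNat 1)
      (rest.1, (i, j) :: rest.2)
    else pvStepA rows cols x y ds g

-- A's `for _ in range(len(Q))` pass: pop every current cell, collect everything appended
def pvLevel (rows cols : Int) : List (Int × Int) → List (List Int) → List (List Int) × List (Int × Int)
  | [], g => (g, [])
  | c :: cs, g =>
    let st := pvStepA rows cols c.1 c.2 pvDirs g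
    let rest := pvLevel rows cols cs st.1
    (rest.1, st.2 ++ rest.2)

-- A's outer `while Q:` loop with the `times` counter (fuel only guards totality; at fuel 0 the
-- loop answer for the already-empty queue is returned, a case never reached from minHour)
def pvLoopA (rows cols : Int) : Nat → List (List Int) → List (Int × Int) → Int → Int
  | 0, _, _, times => max 0 (times - 1)
  | fuel + 1, g, Q, times =>
    if Q = [] then max 0 (times - 1)
    else pvLoopA rows cols fuel (pvLevel rows cols Q g).1 (pvLevel rows cols Q g).2 (times + 1)

def minHour (rows : Int) (columns : Int) (grid : List (List Int)) : Int :=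
  let Q := (PySem.List.pyRange 0 rows 1).foldl (fun acc i =>
    (PySem.List.pyRange 0 columns 1).foldl (fun acc j =>
      if pvCell grid i j = some 1 then acc ++ [(i, j)] else acc) acc) []
  pvLoopA rows columns (pvZeros grid + Q.length + 1) grid Q 0

-- ===== PORT B =====
-- `infected | {(i+di, j+dj) for (i,j) in infected for (di,dj) in dirs if in-window and grid cell == 0}`
-- (the comprehension consumes the set only to build another set, so iteration order is immaterial)
def pvGrown (rows cols : Int) (grid : List (List Int)) (I : PySem.Set (Int × Int)) : PySem.Set (Int × Int) :=
  PySem.Set.union I (I.foldl (fun s c =>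
    pvDirs.foldl (fun s d =>
      let i := c.1 + d.1
      let j := c.2 + d.2
      if 0 ≤ i ∧ i < rows ∧ 0 ≤ j ∧ j < cols ∧ pvCell grid i j = some 0
      then PySem.Set.add s (i, j) else s) s) PySem.Set.empty)

-- B's `while True:` loop (fuel = window size + 1, a strict bound on the number of growing rounds)
def pvLoopB (rows cols : Int) (grid : List (List Int)) : Nat → PySem.Set (Int × Int) → Int → Int
  | 0, _, hours => hours
  | fuel + 1, I, hours =>
    if PySem.Set.equal (pvGrown rows cols grid I) I then hours
    else pvLoopB rows cols grid fuel (pvGrown rows cols grid I) (hours + 1)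

def minHour_alt (rows : Int) (columns : Int) (grid : List (List Int)) : Int :=
  let I := (PySem.List.pyRange 0 rows 1).foldl (fun acc i =>
    (PySem.List.pyRange 0 columns 1).foldl (fun acc j =>
      if pvCell grid i j = some 1 then PySem.Set.add acc (i, j) else acc) acc) PySem.Set.empty
  pvLoopB rows columns grid (rows.toNat * columns.toNat + 1) I 0

-- ===== PRECONDITION & SPEC =====
-- Pre_ excludes exactly the grids on which the Python A raises IndexError while seeding the queue:
-- when rows and columns are positive, grid must have at least `rows` rows, each of the first `rows`
-- rows at least `columns` long.
def Pre_minHour (rows : Int) (columns : Int) (grid : List (List Int)) : Prop :=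
  (0 < rows ∧ 0 < columns) →
    (rows ≤ (grid.length : Int) ∧ ∀ r ∈ grid.take rows.toNat, columns ≤ (r.length : Int))
instance (rows : Int) (columns : Int) (grid : List (List Int)) : Decidable (Pre_minHour rows columns grid) := by
  unfold Pre_minHour; infer_instance

def pvWitness_minHour : Int × Int × List (List Int) := (2, 2, [[1, 0], [0, 0]])

def Spec_minHour (rows : Int) (columns : Int) (grid : List (List Int)) (out : Int) : Prop := out = minHour_alt rows columns grid
instance (rows : Int) (columns : Int) (grid : List (List Int)) (out : Int) : Decidable (Spec_minHour rows columns grid out) := by unfold Spec_minHour; infer_instance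

-- ===== CLAIM (what is proved, stated in full; the proofs are below) =====
def Claim_equal_minHour : Prop := ∀ (rows : Int) (columns : Int) (grid : List (List Int)), Dom_minHour rows columns grid → Pre_minHour rows columns grid → Spec_minHour rows columns grid (minHour rows columns grid)

-- ===== LEMMAS AND PROOFS =====

-- proof-side vocabulary: the window, adjacency, and the measure (window zeros not yet infected)
def pvInW (rows cols : Int) (c : Int × Int) : Prop :=
  0 ≤ c.1 ∧ c.1 < rows ∧ 0 ≤ c.2 ∧ c.2 < cols

def pvAdj (c n : Int × Int) : Prop := ∃ d ∈ pvDirs, n = (c.1 + d.1, c.2 + d.2)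

def pvWindow (rows cols : Int) : List (Int × Int) :=
  (PySem.List.pyRange 0 rows 1).flatMap (fun i => (PySem.List.pyRange 0 cols 1).map (fun j => (i, j)))

def pvZW (rows cols : Int) (grid : List (List Int)) (I : List (Int × Int)) : Nat :=
  ((pvWindow rows cols).filter (fun c => decide (pvCell grid c.1 c.2 = some 0) && decide (c ∉ I))).length

theorem mem_pvWindow (rows cols : Int) (c : Int × Int) :
    c ∈ pvWindow rows cols ↔ pvInW rows cols c := by
  unfold pvWindow pvInW
  simp only [List.mem_flatMap, List.mem_map, PySem.List.mem_pyRange_one]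
  constructor
  · rintro ⟨i, ⟨hi0, hir⟩, j, ⟨hj0, hjc⟩, rfl⟩
    exact ⟨hi0, hir, hj0, hjc⟩
  · rintro ⟨h1, h2, h3, h4⟩
    exact ⟨c.1, ⟨h1, h2⟩, c.2, ⟨h3, h4⟩, rfl⟩

theorem length_pvWindow (rows cols : Int) :
    (pvWindow rows cols).length = rows.toNat * cols.toNat := by
  unfold pvWindow
  rw [List.length_flatMap]
  have h : ((PySem.List.pyRange 0 rows 1).map
      (fun i => ((PySem.List.pyRange 0 cols 1).map (fun j => (i, j))).length)) =
      (PySem.List.pyRange 0 rows 1).map (fun _ => cols.toNat) := by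
    apply List.map_congr_left
    intro i _
    simp [PySem.List.length_pyRange_one]
  rw [h, List.map_const', List.sum_replicate, smul_eq_mul,
    PySem.List.length_pyRange_one]
  simp

-- cell update semantics of pvSet
theorem pvCell_nonneg (g : List (List Int)) (i j : Int) (hi : 0 ≤ i) (hj : 0 ≤ j) :
    pvCell g i j = (g[i.toNat]?.bind fun r => r[j.toNat]?) := by
  unfold pvCell
  rw [PySem.List.pyGet?_of_nonneg g hi]
  cases g[i.toNat]? <;> simp [PySem.List.pyGet?_of_nonneg _ hj]

theorem pvCell_pvSetN : ∀ (g : List (List Int)) (a b : Nat),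
    (g[a]?.bind fun r => r[b]?) = some 0 →
    ∀ a' b' : Nat, ((pvSet g a b 1)[a']?.bind fun r => r[b']?) =
      if a' = a ∧ b' = b then some 1 else (g[a']?.bind fun r => r[b']?) := by
  intro g
  induction g with
  | nil => intro a b h; simp at h
  | cons r gs ih =>
    intro a b h a' b'
    cases a with
    | zero =>
      simp only [List.getElem?_cons_zero, Option.bind_some] at h
      have hb : b < r.length := by
        by_contra hb
        rw [List.getElem?_eq_none (by omega)] at h
        simp at h
      cases a' with
      | zero =>
        simp only [pvSet, List.getElem?_cons_zero, Option.bind_some]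
        rw [List.getElem?_set]
        by_cases hbb : b' = b
        · simp [hbb, hb]
        · simp [hbb, Ne.symm hbb]
      | succ a'' =>
        simp [pvSet]
    | succ s =>
      simp only [List.getElem?_cons_succ] at h
      cases a' with
      | zero => simp [pvSet]
      | succ s' =>
        simp only [pvSet, List.getElem?_cons_succ]
        rw [ih s b h s' b']
        by_cases hc : s' = s ∧ b' = b
        · rw [if_pos hc, if_pos (by omega)]
        · rw [if_neg hc, if_neg (by omega)]

theorem pvCell_pvSet (g : List (List Int)) (i j : Int) (hi : 0 ≤ i) (hj : 0 ≤ j)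
    (h0 : pvCell g i j = some 0) (i' j' : Int) (hi' : 0 ≤ i') (hj' : 0 ≤ j') :
    pvCell (pvSet g i.toNat j.toNat 1) i' j' =
      if i' = i ∧ j' = j then some 1 else pvCell g i' j' := by
  rw [pvCell_nonneg _ _ _ hi hj] at h0
  rw [pvCell_nonneg _ _ _ hi' hj', pvCell_pvSetN g i.toNat j.toNat h0 i'.toNat j'.toNat]
  by_cases hc : i' = i ∧ j' = j
  · rw [if_pos (by omega), if_pos hc]
  · rw [if_neg (by omega), if_neg hc, pvCell_nonneg _ _ _ hi' hj']

-- fuel bookkeeping for A (each appended cell consumed one zero)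
theorem pvSet_zeros : ∀ (g : List (List Int)) (i j : Nat),
    (g[i]?.bind fun r => r[j]?) = some 0 → pvZeros (pvSet g i j 1) + 1 = pvZeros g := by
  intro g i j hg
  induction g generalizing i with
  | nil => simp at hg
  | cons r g ihg =>
    cases i with
    | zero =>
      simp only [List.getElem?_cons_zero, Option.bind_some] at hg
      have hrow : ∀ (r : List Int) (j : Nat), r[j]? = some 0 →
          (r.set j 1).count 0 + 1 = r.count 0 := by
        intro r j hr
        induction r generalizing j with
        | nil => simp at hr
        | cons a r ihr =>
          cases j with
          | zero =>
            simp only [List.getElem?_cons_zero, Option.some_inj] at hr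
            subst hr
            simp
          | succ j =>
            simp only [List.getElem?_cons_succ] at hr
            simp only [List.set_cons_succ, List.count_cons]
            have := ihr j hr
            omega
      have := hrow r j hg
      simp only [pvSet, pvZeros, List.map_cons, List.sum_cons]
      omega
    | succ i =>
      simp only [List.getElem?_cons_succ] at hg
      have := ihg i hg
      simp only [pvZeros, pvSet, List.map_cons, List.sum_cons] at this ⊢
      omega

theorem pvStepA_zeros (rows cols x y : Int) (ds : List (Int × Int)) (g : List (List Int)) :
    pvZeros (pvStepA rows cols x y ds g).1 + (pvStepA rows cols x y ds g).2.length = pvZeros g := by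
  induction ds generalizing g with
  | nil => simp [pvStepA]
  | cons d ds ih =>
    obtain ⟨dx, dy⟩ := d
    simp only [pvStepA]
    split
    · rename_i h
      have h0 : pvCell g (x + dx) (y + dy) = some 0 := h.2.2.2.2
      have hi : 0 ≤ x + dx := h.1
      have hj : 0 ≤ y + dy := h.2.2.1
      have key : pvZeros (pvSet g (x + dx).toNat (y + dy).toNat 1) + 1 = pvZeros g := by
        apply pvSet_zeros
        rw [← pvCell_nonneg _ _ _ hi hj]
        exact h0
      have := ih (pvSet g (x + dx).toNat (y + dy).toNat 1)
      simp only [List.length_cons]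
      omega
    · exact ih g

theorem pvLevel_zeros (rows cols : Int) (cs : List (Int × Int)) (g : List (List Int)) :
    pvZeros (pvLevel rows cols cs g).1 + (pvLevel rows cols cs g).2.length = pvZeros g := by
  induction cs generalizing g with
  | nil => simp [pvLevel]
  | cons c cs ih =>
    simp only [pvLevel, List.length_append]
    have h1 := pvStepA_zeros rows cols c.1 c.2 pvDirs g
    have h2 := ih (pvStepA rows cols c.1 c.2 pvDirs g).1
    omega

-- characterisation of one pvStepA call: pointwise grid effect and membership of the appended list
theorem pvStepA_val (rows cols x y : Int) (ds : List (Int × Int)) (g : List (List Int))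
    (i j : Int) (hi : 0 ≤ i) (hj : 0 ≤ j) :
    pvCell (pvStepA rows cols x y ds g).1 i j =
      if (i, j) ∈ (pvStepA rows cols x y ds g).2 then some 1 else pvCell g i j := by
  induction ds generalizing g with
  | nil => simp [pvStepA]
  | cons d ds ih =>
    obtain ⟨dx, dy⟩ := d
    simp only [pvStepA]
    split
    · rename_i h
      rw [ih (pvSet g (x + dx).toNat (y + dy).toNat 1)]
      have hset := pvCell_pvSet g (x + dx) (y + dy) h.1 h.2.2.1 h.2.2.2.2 i j hi hj
      by_cases hmem : (i, j) ∈ (pvStepA rows cols x y ds (pvSet g (x + dx).toNat (y + dy).toNat 1)).2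
      · simp [hmem]
      · rw [if_neg hmem, hset]
        by_cases he : i = x + dx ∧ j = y + dy
        · rw [if_pos he]
          have : (i, j) ∈ ((x + dx, y + dy) : Int × Int) :: (pvStepA rows cols x y ds (pvSet g (x + dx).toNat (y + dy).toNat 1)).2 := by
            simp [he.1, he.2]
          rw [if_pos this]
        · rw [if_neg he, if_neg]
          simp only [List.mem_cons, Prod.mk.injEq]
          push Not
          exact ⟨fun h1 h2 => he ⟨h1, h2⟩, hmem⟩
    · exact ih g

theorem pvStepA_mem (rows cols x y : Int) (ds : List (Int × Int)) (g : List (List Int)) (n : Int × Int) :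
    n ∈ (pvStepA rows cols x y ds g).2 ↔
      ∃ d ∈ ds, n = (x + d.1, y + d.2) ∧ pvInW rows cols n ∧ pvCell g n.1 n.2 = some 0 := by
  induction ds generalizing g with
  | nil => simp [pvStepA]
  | cons d ds ih =>
    obtain ⟨dx, dy⟩ := d
    simp only [pvStepA]
    split
    · rename_i h
      have hset := fun (a b : Int) (ha : 0 ≤ a) (hb : 0 ≤ b) =>
        pvCell_pvSet g (x + dx) (y + dy) h.1 h.2.2.1 h.2.2.2.2 a b ha hb
      constructor
      · intro hmem
        rcases List.mem_cons.1 hmem with rfl | hrest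
        · exact ⟨(dx, dy), List.mem_cons_self .., rfl,
            ⟨h.1, h.2.1, h.2.2.1, h.2.2.2.1⟩, h.2.2.2.2⟩
        · obtain ⟨d', hd', hn, hW, h0⟩ := (ih _).1 hrest
          rw [hset n.1 n.2 hW.1 hW.2.2.1] at h0
          refine ⟨d', List.mem_cons_of_mem _ hd', hn, hW, ?_⟩
          by_cases hc : n.1 = x + dx ∧ n.2 = y + dy
          · rw [if_pos hc] at h0; simp at h0
          · rwa [if_neg hc] at h0
      · rintro ⟨d', hd', hn, hW, h0⟩
        rcases List.mem_cons.1 hd' with rfl | hd''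
        · exact List.mem_cons.2 (Or.inl hn)
        · by_cases hc : n = (x + dx, y + dy)
          · exact List.mem_cons.2 (Or.inl hc)
          · apply List.mem_cons.2
            right
            apply (ih _).2
            refine ⟨d', hd'', hn, hW, ?_⟩
            rw [hset n.1 n.2 hW.1 hW.2.2.1, if_neg]
            · exact h0
            · intro hcc
              exact hc (Prod.ext hcc.1 hcc.2)
    · rename_i h
      rw [ih g]
      constructor
      · rintro ⟨d', hd', hn, hW, h0⟩
        exact ⟨d', List.mem_cons_of_mem _ hd', hn, hW, h0⟩
      · rintro ⟨d', hd', hn, hW, h0⟩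
        rcases List.mem_cons.1 hd' with rfl | hd''
        · exfalso
          apply h
          subst hn
          exact ⟨hW.1, hW.2.1, hW.2.2.1, hW.2.2.2, h0⟩
        · exact ⟨d', hd'', hn, hW, h0⟩

-- characterisation of one whole level of A
theorem pvLevel_val (rows cols : Int) (cs : List (Int × Int)) (g : List (List Int))
    (i j : Int) (hi : 0 ≤ i) (hj : 0 ≤ j) :
    pvCell (pvLevel rows cols cs g).1 i j =
      if (i, j) ∈ (pvLevel rows cols cs g).2 then some 1 else pvCell g i j := by
  induction cs generalizing g with
  | nil => simp [pvLevel]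
  | cons c cs ih =>
    simp only [pvLevel, List.mem_append]
    rw [ih (pvStepA rows cols c.1 c.2 pvDirs g).1,
        pvStepA_val rows cols c.1 c.2 pvDirs g i j hi hj]
    by_cases h1 : (i, j) ∈ (pvLevel rows cols cs (pvStepA rows cols c.1 c.2 pvDirs g).1).2
    · simp [h1]
    · by_cases h2 : (i, j) ∈ (pvStepA rows cols c.1 c.2 pvDirs g).2 <;> simp [h1, h2]

theorem pvLevel_mem (rows cols : Int) (cs : List (Int × Int)) (g : List (List Int)) (n : Int × Int) :
    n ∈ (pvLevel rows cols cs g).2 ↔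
      ∃ c ∈ cs, pvAdj c n ∧ pvInW rows cols n ∧ pvCell g n.1 n.2 = some 0 := by
  induction cs generalizing g with
  | nil => simp [pvLevel]
  | cons c cs ih =>
    simp only [pvLevel, List.mem_append]
    constructor
    · rintro (hst | hrest)
      · obtain ⟨d, hd, hn, hW, h0⟩ := (pvStepA_mem rows cols c.1 c.2 pvDirs g n).1 hst
        exact ⟨c, List.mem_cons_self .., ⟨d, hd, hn⟩, hW, h0⟩
      · obtain ⟨c', hc', hadj, hW, h0⟩ := (ih _).1 hrest
        rw [pvStepA_val rows cols c.1 c.2 pvDirs g n.1 n.2 hW.1 hW.2.2.1] at h0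
        by_cases hm : (n.1, n.2) ∈ (pvStepA rows cols c.1 c.2 pvDirs g).2
        · rw [if_pos hm] at h0; simp at h0
        · rw [if_neg hm] at h0
          exact ⟨c', List.mem_cons_of_mem _ hc', hadj, hW, h0⟩
    · rintro ⟨c', hc', hadj, hW, h0⟩
      rcases List.mem_cons.1 hc' with rfl | hc''
      · left
        apply (pvStepA_mem rows cols c'.1 c'.2 pvDirs g n).2
        obtain ⟨d, hd, hn⟩ := hadj
        exact ⟨d, hd, hn, hW, h0⟩
      · by_cases hm : n ∈ (pvStepA rows cols c.1 c.2 pvDirs g).2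
        · exact Or.inl hm
        · right
          apply (ih _).2
          refine ⟨c', hc'', hadj, hW, ?_⟩
          rw [pvStepA_val rows cols c.1 c.2 pvDirs g n.1 n.2 hW.1 hW.2.2.1, if_neg]
          · exact h0
          · simpa using hm

-- membership in B's dilation
theorem mem_pvGrown_inner (rows cols : Int) (grid : List (List Int)) (c : Int × Int) :
    ∀ (ds : List (Int × Int)) (s : PySem.Set (Int × Int)) (n : Int × Int),
    n ∈ ds.foldl (fun s d =>
      if 0 ≤ c.1 + d.1 ∧ c.1 + d.1 < rows ∧ 0 ≤ c.2 + d.2 ∧ c.2 + d.2 < cols ∧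
          pvCell grid (c.1 + d.1) (c.2 + d.2) = some 0
      then PySem.Set.add s (c.1 + d.1, c.2 + d.2) else s) s ↔
      n ∈ s ∨ ∃ d ∈ ds, n = (c.1 + d.1, c.2 + d.2) ∧
        pvInW rows cols n ∧ pvCell grid n.1 n.2 = some 0 := by
  intro ds
  induction ds with
  | nil => simp
  | cons d ds ih =>
    intro s n
    simp only [List.foldl_cons]
    split
    · rename_i h
      rw [ih, PySem.Set.mem_add]
      constructor
      · rintro ((hs | rfl) | hrest)
        · exact Or.inl hs
        · exact Or.inr ⟨d, List.mem_cons_self ..,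
            rfl, ⟨h.1, h.2.1, h.2.2.1, h.2.2.2.1⟩, h.2.2.2.2⟩
        · obtain ⟨d', hd', hn, hW, h0⟩ := hrest
          exact Or.inr ⟨d', List.mem_cons_of_mem _ hd', hn, hW, h0⟩
      · rintro (hs | ⟨d', hd', hn, hW, h0⟩)
        · exact Or.inl (Or.inl hs)
        · rcases List.mem_cons.1 hd' with rfl | hd''
          · exact Or.inl (Or.inr hn)
          · exact Or.inr ⟨d', hd'', hn, hW, h0⟩
    · rename_i h
      rw [ih]
      constructor
      · rintro (hs | ⟨d', hd', hn, hW, h0⟩)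
        · exact Or.inl hs
        · exact Or.inr ⟨d', List.mem_cons_of_mem _ hd', hn, hW, h0⟩
      · rintro (hs | ⟨d', hd', hn, hW, h0⟩)
        · exact Or.inl hs
        · rcases List.mem_cons.1 hd' with rfl | hd''
          · exfalso
            apply h
            subst hn
            exact ⟨hW.1, hW.2.1, hW.2.2.1, hW.2.2.2, h0⟩
          · exact Or.inr ⟨d', hd'', hn, hW, h0⟩

theorem mem_pvGrown_outer (rows cols : Int) (grid : List (List Int)) :
    ∀ (l : List (Int × Int)) (s : PySem.Set (Int × Int)) (n : Int × Int),
    n ∈ l.foldl (fun s c =>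
      pvDirs.foldl (fun s d =>
        if 0 ≤ c.1 + d.1 ∧ c.1 + d.1 < rows ∧ 0 ≤ c.2 + d.2 ∧ c.2 + d.2 < cols ∧
            pvCell grid (c.1 + d.1) (c.2 + d.2) = some 0
        then PySem.Set.add s (c.1 + d.1, c.2 + d.2) else s) s) s ↔
      n ∈ s ∨ ∃ c ∈ l, pvAdj c n ∧ pvInW rows cols n ∧ pvCell grid n.1 n.2 = some 0 := by
  intro l
  induction l with
  | nil => simp
  | cons c cs ih =>
    intro s n
    simp only [List.foldl_cons]
    rw [ih, mem_pvGrown_inner]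
    constructor
    · rintro ((hs | ⟨d, hd, hn, hW, h0⟩) | ⟨c', hc', hadj, hW, h0⟩)
      · exact Or.inl hs
      · exact Or.inr ⟨c, List.mem_cons_self .., ⟨d, hd, hn⟩, hW, h0⟩
      · exact Or.inr ⟨c', List.mem_cons_of_mem _ hc', hadj, hW, h0⟩
    · rintro (hs | ⟨c', hc', ⟨d, hd, hn⟩, hW, h0⟩)
      · exact Or.inl (Or.inl hs)
      · rcases List.mem_cons.1 hc' with rfl | hc''
        · exact Or.inl (Or.inr ⟨d, hd, hn, hW, h0⟩)
        · exact Or.inr ⟨c', hc'', ⟨d, hd, hn⟩, hW, h0⟩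

theorem mem_pvGrown (rows cols : Int) (grid : List (List Int)) (I : PySem.Set (Int × Int)) (n : Int × Int) :
    n ∈ pvGrown rows cols grid I ↔
      n ∈ I ∨ ∃ c ∈ I, pvAdj c n ∧ pvInW rows cols n ∧ pvCell grid n.1 n.2 = some 0 := by
  unfold pvGrown
  rw [PySem.Set.mem_union, mem_pvGrown_outer]
  simp [PySem.Set.empty]

-- strict decrease of the measure
theorem pv_filter_lt {α : Type} (p q : α → Bool) :
    ∀ (l : List α), (∀ c ∈ l, q c = true → p c = true) →
    ∀ x, x ∈ l → p x = true → q x = false →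
    (l.filter q).length < (l.filter p).length := by
  have mono : ∀ (l : List α), (∀ c ∈ l, q c = true → p c = true) →
      (l.filter q).length ≤ (l.filter p).length := by
    intro l
    induction l with
    | nil => simp
    | cons a l ih =>
      intro hm
      have ht := ih (fun c hc => hm c (List.mem_cons_of_mem _ hc))
      by_cases hq : q a = true
      · have hp := hm a (List.mem_cons_self ..) hq
        simp [hq, hp]
        omega
      · simp only [List.filter_cons, Bool.not_eq_true] at *
        rw [if_neg (by simp [hq])]
        split <;> simp <;> omega
  intro l
  induction l with
  | nil => intro _ x hx; cases hx
  | cons a l ih =>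
    intro hm x hx hpx hqx
    have hmt : ∀ c ∈ l, q c = true → p c = true :=
      fun c hc => hm c (List.mem_cons_of_mem _ hc)
    rcases List.mem_cons.1 hx with rfl | hx'
    · have ht := mono l hmt
      simp only [List.filter_cons, hqx, hpx]
      rw [if_neg (by simp)]
      simp
      omega
    · have ht := ih hmt x hx' hpx hqx
      by_cases hq : q a = true
      · have hp := hm a (List.mem_cons_self ..) hq
        simp [hq, hp]
        omega
      · simp only [List.filter_cons, Bool.not_eq_true] at *
        rw [if_neg (by simp [hq])]
        split <;> simp <;> omega

theorem pvZW_lt (rows cols : Int) (grid : List (List Int)) (I I' : List (Int × Int))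
    (hsub : ∀ c ∈ I, c ∈ I') (x : Int × Int) (hxW : pvInW rows cols x)
    (hx0 : pvCell grid x.1 x.2 = some 0) (hxI : x ∉ I) (hxI' : x ∈ I') :
    pvZW rows cols grid I' < pvZW rows cols grid I := by
  unfold pvZW
  apply pv_filter_lt
  · intro c _ hq
    simp only [Bool.and_eq_true, decide_eq_true_eq] at hq ⊢
    exact ⟨hq.1, fun hc => hq.2 (hsub c hc)⟩
  · exact (mem_pvWindow rows cols x).2 hxW
  · simp only [Bool.and_eq_true, decide_eq_true_eq]
    exact ⟨hx0, hxI⟩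
  · simp [hxI']

-- loop unfoldings
theorem pvLoopA_nil (rows cols : Int) (f : Nat) (g : List (List Int)) (t : Int) :
    pvLoopA rows cols f g [] t = max 0 (t - 1) := by
  cases f <;> simp [pvLoopA]

theorem pvLoopA_succ_ne (rows cols : Int) (f : Nat) (g : List (List Int)) (Q : List (Int × Int))
    (t : Int) (h : Q ≠ []) :
    pvLoopA rows cols (f + 1) g Q t =
      pvLoopA rows cols f (pvLevel rows cols Q g).1 (pvLevel rows cols Q g).2 (t + 1) := by
  simp [pvLoopA, h]

-- membership in the seed accumulators (A's list, B's set): exactly the window cells holding 1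
theorem mem_seedA_inner (grid : List (List Int)) (i : Int) :
    ∀ (js : List Int) (acc : List (Int × Int)) (c : Int × Int),
    c ∈ js.foldl (fun acc j =>
        if pvCell grid i j = some 1 then acc ++ [(i, j)] else acc) acc ↔
      c ∈ acc ∨ ∃ j ∈ js, c = (i, j) ∧ pvCell grid i j = some 1 := by
  intro js
  induction js with
  | nil => simp
  | cons j js ih =>
    intro acc c
    simp only [List.foldl_cons]
    split
    · rename_i h1
      rw [ih]
      simp only [List.mem_append, List.mem_cons, List.not_mem_nil, or_false]
      constructor
      · rintro ((hs | rfl) | ⟨j', hj', rfl, h0⟩)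
        · exact Or.inl hs
        · exact Or.inr ⟨j, Or.inl rfl, rfl, h1⟩
        · exact Or.inr ⟨j', Or.inr hj', rfl, h0⟩
      · rintro (hs | ⟨j', hj', rfl, h0⟩)
        · exact Or.inl (Or.inl hs)
        · rcases hj' with rfl | hj''
          · exact Or.inl (Or.inr rfl)
          · exact Or.inr ⟨j', hj'', rfl, h0⟩
    · rename_i h1
      rw [ih]
      simp only [List.mem_cons]
      constructor
      · rintro (hs | ⟨j', hj', rfl, h0⟩)
        · exact Or.inl hs
        · exact Or.inr ⟨j', Or.inr hj', rfl, h0⟩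
      · rintro (hs | ⟨j', hj', rfl, h0⟩)
        · exact Or.inl hs
        · rcases hj' with rfl | hj''
          · exact absurd h0 h1
          · exact Or.inr ⟨j', hj'', rfl, h0⟩

theorem mem_seedA (rows cols : Int) (grid : List (List Int)) (c : Int × Int) :
    c ∈ ((PySem.List.pyRange 0 rows 1).foldl (fun acc i =>
      (PySem.List.pyRange 0 cols 1).foldl (fun acc j =>
        if pvCell grid i j = some 1 then acc ++ [(i, j)] else acc) acc) []) ↔
      pvInW rows cols c ∧ pvCell grid c.1 c.2 = some 1 := by
  have outer : ∀ (rs : List Int) (acc : List (Int × Int)),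
      c ∈ rs.foldl (fun acc i =>
        (PySem.List.pyRange 0 cols 1).foldl (fun acc j =>
          if pvCell grid i j = some 1 then acc ++ [(i, j)] else acc) acc) acc ↔
        c ∈ acc ∨ ∃ i ∈ rs, ∃ j ∈ PySem.List.pyRange 0 cols 1,
          c = (i, j) ∧ pvCell grid i j = some 1 := by
    intro rs
    induction rs with
    | nil => simp
    | cons i rs ih =>
      intro acc
      simp only [List.foldl_cons]
      rw [ih, mem_seedA_inner]
      simp only [List.mem_cons]
      constructor
      · rintro ((hs | ⟨j, hj, rfl, h0⟩) | ⟨i', hi', j, hj, rfl, h0⟩)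
        · exact Or.inl hs
        · exact Or.inr ⟨i, Or.inl rfl, j, hj, rfl, h0⟩
        · exact Or.inr ⟨i', Or.inr hi', j, hj, rfl, h0⟩
      · rintro (hs | ⟨i', hi', j, hj, rfl, h0⟩)
        · exact Or.inl (Or.inl hs)
        · rcases hi' with rfl | hi''
          · exact Or.inl (Or.inr ⟨j, hj, rfl, h0⟩)
          · exact Or.inr ⟨i', hi'', j, hj, rfl, h0⟩
  rw [outer]
  simp only [List.not_mem_nil, false_or, PySem.List.mem_pyRange_one]
  unfold pvInW
  constructor
  · rintro ⟨i, ⟨hi0, hir⟩, j, ⟨hj0, hjc⟩, rfl, h1⟩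
    exact ⟨⟨hi0, hir, hj0, hjc⟩, h1⟩
  · rintro ⟨⟨h1, h2, h3, h4⟩, h0⟩
    exact ⟨c.1, ⟨h1, h2⟩, c.2, ⟨h3, h4⟩, rfl, h0⟩

theorem mem_seedB_inner (grid : List (List Int)) (i : Int) :
    ∀ (js : List Int) (acc : PySem.Set (Int × Int)) (c : Int × Int),
    c ∈ js.foldl (fun acc j =>
        if pvCell grid i j = some 1 then PySem.Set.add acc (i, j) else acc) acc ↔
      c ∈ acc ∨ ∃ j ∈ js, c = (i, j) ∧ pvCell grid i j = some 1 := by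
  intro js
  induction js with
  | nil => simp
  | cons j js ih =>
    intro acc c
    simp only [List.foldl_cons]
    split
    · rename_i h1
      rw [ih, PySem.Set.mem_add]
      simp only [List.mem_cons]
      constructor
      · rintro ((hs | rfl) | ⟨j', hj', rfl, h0⟩)
        · exact Or.inl hs
        · exact Or.inr ⟨j, Or.inl rfl, rfl, h1⟩
        · exact Or.inr ⟨j', Or.inr hj', rfl, h0⟩
      · rintro (hs | ⟨j', hj', rfl, h0⟩)
        · exact Or.inl (Or.inl hs)
        · rcases hj' with rfl | hj''
          · exact Or.inl (Or.inr rfl)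
          · exact Or.inr ⟨j', hj'', rfl, h0⟩
    · rename_i h1
      rw [ih]
      simp only [List.mem_cons]
      constructor
      · rintro (hs | ⟨j', hj', rfl, h0⟩)
        · exact Or.inl hs
        · exact Or.inr ⟨j', Or.inr hj', rfl, h0⟩
      · rintro (hs | ⟨j', hj', rfl, h0⟩)
        · exact Or.inl hs
        · rcases hj' with rfl | hj''
          · exact absurd h0 h1
          · exact Or.inr ⟨j', hj'', rfl, h0⟩

theorem mem_seedB (rows cols : Int) (grid : List (List Int)) (c : Int × Int) :
    c ∈ ((PySem.List.pyRange 0 rows 1).foldl (fun acc i =>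
      (PySem.List.pyRange 0 cols 1).foldl (fun acc j =>
        if pvCell grid i j = some 1 then PySem.Set.add acc (i, j) else acc) acc) PySem.Set.empty) ↔
      pvInW rows cols c ∧ pvCell grid c.1 c.2 = some 1 := by
  have outer : ∀ (rs : List Int) (acc : PySem.Set (Int × Int)),
      c ∈ rs.foldl (fun acc i =>
        (PySem.List.pyRange 0 cols 1).foldl (fun acc j =>
          if pvCell grid i j = some 1 then PySem.Set.add acc (i, j) else acc) acc) acc ↔
        c ∈ acc ∨ ∃ i ∈ rs, ∃ j ∈ PySem.List.pyRange 0 cols 1,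
          c = (i, j) ∧ pvCell grid i j = some 1 := by
    intro rs
    induction rs with
    | nil => simp
    | cons i rs ih =>
      intro acc
      simp only [List.foldl_cons]
      rw [ih, mem_seedB_inner]
      simp only [List.mem_cons]
      constructor
      · rintro ((hs | ⟨j, hj, rfl, h0⟩) | ⟨i', hi', j, hj, rfl, h0⟩)
        · exact Or.inl hs
        · exact Or.inr ⟨i, Or.inl rfl, j, hj, rfl, h0⟩
        · exact Or.inr ⟨i', Or.inr hi', j, hj, rfl, h0⟩
      · rintro (hs | ⟨i', hi', j, hj, rfl, h0⟩)
        · exact Or.inl (Or.inl hs)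
        · rcases hi' with rfl | hi''
          · exact Or.inl (Or.inr ⟨j, hj, rfl, h0⟩)
          · exact Or.inr ⟨i', hi'', j, hj, rfl, h0⟩
  rw [outer]
  simp only [PySem.Set.empty, List.not_mem_nil, false_or, PySem.List.mem_pyRange_one]
  unfold pvInW
  constructor
  · rintro ⟨i, ⟨hi0, hir⟩, j, ⟨hj0, hjc⟩, rfl, h1⟩
    exact ⟨⟨hi0, hir, hj0, hjc⟩, h1⟩
  · rintro ⟨⟨h1, h2, h3, h4⟩, h0⟩
    exact ⟨c.1, ⟨h1, h2⟩, c.2, ⟨h3, h4⟩, rfl, h0⟩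

-- the simulation: A's queue loop and B's dilation loop agree, in lockstep
theorem pvBridge (rows cols : Int) (grid : List (List Int)) :
    ∀ (k : Nat) (g : List (List Int)) (Q : List (Int × Int)) (I : PySem.Set (Int × Int))
      (t : Int) (f1 f2 : Nat),
    pvZW rows cols grid I = k →
    Q ≠ [] → 0 ≤ t →
    (∀ c ∈ I, pvInW rows cols c) →
    (∀ i j : Int, 0 ≤ i → 0 ≤ j →
      pvCell g i j = if (i, j) ∈ I then some 1 else pvCell grid i j) →
    (∀ c ∈ Q, c ∈ I) →
    (∀ n : Int × Int, pvInW rows cols n → pvCell grid n.1 n.2 = some 0 → n ∉ I →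
      (∃ c ∈ I, pvAdj c n) → ∃ c ∈ Q, pvAdj c n) →
    pvZeros g + Q.length < f1 → k < f2 →
    pvLoopA rows cols f1 g Q t = pvLoopB rows cols grid f2 I t := by
  intro k
  induction k using Nat.strong_induction_on with
  | _ k ih =>
    intro g Q I t f1 f2 hk hQ ht hb ha hc hd hf1 hf2
    obtain ⟨f1', rfl⟩ : ∃ m, f1 = m + 1 := ⟨f1 - 1, by omega⟩
    obtain ⟨f2', rfl⟩ : ∃ m, f2 = m + 1 := ⟨f2 - 1, by omega⟩
    rw [pvLoopA_succ_ne _ _ _ _ _ _ hQ]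
    have hFmem : ∀ n : Int × Int, n ∈ (pvLevel rows cols Q g).2 ↔
        pvInW rows cols n ∧ pvCell grid n.1 n.2 = some 0 ∧ n ∉ I ∧ ∃ c ∈ Q, pvAdj c n := by
      intro n
      rw [pvLevel_mem]
      constructor
      · rintro ⟨c, hcQ, hadj, hW, hg0⟩
        rw [ha n.1 n.2 hW.1 hW.2.2.1] at hg0
        by_cases hnI : (n.1, n.2) ∈ I
        · rw [if_pos hnI] at hg0; simp at hg0
        · rw [if_neg hnI] at hg0
          exact ⟨hW, hg0, by simpa using hnI, c, hcQ, hadj⟩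
      · rintro ⟨hW, h0, hnI, c, hcQ, hadj⟩
        refine ⟨c, hcQ, hadj, hW, ?_⟩
        rw [ha n.1 n.2 hW.1 hW.2.2.1, if_neg (by simpa using hnI)]
        exact h0
    have hGmem : ∀ n : Int × Int, n ∈ pvGrown rows cols grid I ↔
        n ∈ I ∨ n ∈ (pvLevel rows cols Q g).2 := by
      intro n
      rw [mem_pvGrown]
      constructor
      · rintro (h | ⟨c, hcI, hadj, hW, h0⟩)
        · exact Or.inl h
        · by_cases hnI : n ∈ I
          · exact Or.inl hnI
          · exact Or.inr ((hFmem n).2 ⟨hW, h0, hnI, hd n hW h0 hnI ⟨c, hcI, hadj⟩⟩)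
      · rintro (h | h)
        · exact Or.inl h
        · obtain ⟨hW, h0, hnI, c, hcQ, hadj⟩ := (hFmem n).1 h
          exact Or.inr ⟨c, hc c hcQ, hadj, hW, h0⟩
    by_cases hFnil : (pvLevel rows cols Q g).2 = []
    · have hEq : PySem.Set.equal (pvGrown rows cols grid I) I = true := by
        rw [PySem.Set.equal_iff]
        intro x
        rw [hGmem, hFnil]
        simp
      simp only [pvLoopB, hEq, if_true]
      rw [hFnil, pvLoopA_nil]
      omega
    · have hNeq : PySem.Set.equal (pvGrown rows cols grid I) I = false := by
        obtain ⟨n0, hn0⟩ := List.exists_mem_of_ne_nil _ hFnil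
        have hp := (hFmem n0).1 hn0
        rcases hbool : PySem.Set.equal (pvGrown rows cols grid I) I with _ | _
        · rfl
        · exfalso
          have := (PySem.Set.equal_iff _ _).1 hbool n0
          exact hp.2.2.1 (this.1 ((hGmem n0).2 (Or.inr hn0)))
      simp only [pvLoopB, hNeq, Bool.false_eq_true, if_false]
      obtain ⟨n0, hn0⟩ := List.exists_mem_of_ne_nil _ hFnil
      have hp0 := (hFmem n0).1 hn0
      have hmeas : pvZW rows cols grid (pvGrown rows cols grid I) < k := by
        rw [← hk]
        exact pvZW_lt rows cols grid I (pvGrown rows cols grid I)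
          (fun c hci => (hGmem c).2 (Or.inl hci)) n0 hp0.1 hp0.2.1 hp0.2.2.1
          ((hGmem n0).2 (Or.inr hn0))
      apply ih _ hmeas _ _ _ _ _ _ rfl hFnil (by omega)
      · -- (b) members of grown are window cells
        intro c hcG
        rcases (hGmem c).1 hcG with h | h
        · exact hb c h
        · exact ((hFmem c).1 h).1
      · -- (a) pointwise grid description
        intro i j hi hj
        rw [pvLevel_val rows cols Q g i j hi hj]
        by_cases hF1 : (i, j) ∈ (pvLevel rows cols Q g).2
        · rw [if_pos hF1, if_pos ((hGmem (i, j)).2 (Or.inr hF1))]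
        · rw [if_neg hF1, ha i j hi hj]
          by_cases hI1 : (i, j) ∈ I
          · rw [if_pos hI1, if_pos ((hGmem (i, j)).2 (Or.inl hI1))]
          · rw [if_neg hI1, if_neg]
            intro hcon
            rcases (hGmem (i, j)).1 hcon with h | h
            · exact hI1 h
            · exact hF1 h
      · -- (c) the new queue is contained in the grown set
        intro c hcF
        exact (hGmem c).2 (Or.inr hcF)
      · -- (d) frontier completeness for the new state
        rintro n hW h0 hnG ⟨c, hcG, hadj⟩
        rcases (hGmem c).1 hcG with hcI | hcF
        · exfalso
          apply hnG
          exact (mem_pvGrown rows cols grid I n).2 (Or.inr ⟨c, hcI, hadj, hW, h0⟩)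
        · exact ⟨c, hcF, hadj⟩
      · -- fuel for A
        have hz := pvLevel_zeros rows cols Q g
        have hQlen : 0 < Q.length := List.length_pos_of_ne_nil hQ
        omega
      · -- fuel for B
        omega

theorem pv_main (rows cols : Int) (grid : List (List Int)) :
    minHour rows cols grid = minHour_alt rows cols grid := by
  unfold minHour minHour_alt
  simp only []
  set Q := (PySem.List.pyRange 0 rows 1).foldl (fun acc i =>
    (PySem.List.pyRange 0 cols 1).foldl (fun acc j =>
      if pvCell grid i j = some 1 then acc ++ [(i, j)] else acc) acc) [] with hQdef
  set I := (PySem.List.pyRange 0 rows 1).foldl (fun acc i =>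
    (PySem.List.pyRange 0 cols 1).foldl (fun acc j =>
      if pvCell grid i j = some 1 then PySem.Set.add acc (i, j) else acc) acc)
    PySem.Set.empty with hIdef
  have hQmem : ∀ c : Int × Int, c ∈ Q ↔ pvInW rows cols c ∧ pvCell grid c.1 c.2 = some 1 :=
    fun c => mem_seedA rows cols grid c
  have hImem : ∀ c : Int × Int, c ∈ I ↔ pvInW rows cols c ∧ pvCell grid c.1 c.2 = some 1 :=
    fun c => mem_seedB rows cols grid c
  by_cases hQ : Q = []
  · rw [hQ, pvLoopA_nil]
    have hI : I = [] := by
      cases hIcase : I with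
      | nil => rfl
      | cons a tl =>
        exfalso
        have : a ∈ Q := (hQmem a).2 ((hImem a).1 (by rw [hIcase]; exact List.mem_cons_self ..))
        rw [hQ] at this
        cases this
    have hEq : PySem.Set.equal (pvGrown rows cols grid I) I = true := by
      rw [PySem.Set.equal_iff]
      intro x
      rw [mem_pvGrown, hI]
      simp
    simp only [pvLoopB, hEq, if_true]
    omega
  · apply pvBridge rows cols grid (pvZW rows cols grid I) grid Q I 0 _ _ rfl hQ le_rfl
    · intro c hcI
      exact ((hImem c).1 hcI).1
    · intro i j _ _
      by_cases h : (i, j) ∈ I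
      · rw [if_pos h]
        exact ((hImem (i, j)).1 h).2
      · rw [if_neg h]
    · intro c hcQ
      exact (hImem c).2 ((hQmem c).1 hcQ)
    · rintro n _ _ _ ⟨c, hcI, hadj⟩
      exact ⟨c, (hQmem c).2 ((hImem c).1 hcI), hadj⟩
    · omega
    · have hle : pvZW rows cols grid I ≤ (pvWindow rows cols).length :=
        List.length_filter_le _ _
      rw [length_pvWindow] at hle
      omega

-- ===== VERDICT (by name: the statement is the Claim_ definition above) =====
theorem minHour_spec : Claim_equal_minHour := by
  intro rows cols grid _ _
  unfold Spec_minHour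
  exact pv_main rows cols grid
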